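-- pv_equiv track=rewrite | github.com/mls6888/lab6 | main.py | count_non_overlapping
-- ===== SOURCE A (Python) =====
-- def count_non_overlapping(s, substr, start):
--   s2=s[start:len(s)]
--   i=0
--   a=len(substr)
--   d=0
--   while (i<=(len(s2)-1)):
--     b=i+a
--     if (substr==s2[i:b]):
--       i=i+a
--       d=d+1
--     else:
--       i=i+1
--   return d
--
--
--
--
--
--
--   """
--   Return the number of non-overlapping occurrences of substr in s
--   starting from the index start.
--   You can not use str method s.count.
--   """
--   return 0
-- ===== SOURCE B (Python) =====
-- def count_non_overlapping(s, substr, start):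
--     return len(s[start:len(s)].split(substr)) - 1
-- ===== Notes on version B (the rewrite author's own statement) =====
-- stated objective: simpler
-- what changed: A's manual position-by-position scan (compare a fresh slice at each index, skip by the pattern length on a match) is replaced by a one-line split-and-count: len(s[start:].split(substr)) - 1, since str.split cuts at exactly the greedy non-overlapping occurrences.
-- outside the precondition, e.g. on count_non_overlapping('ab', '', 0): A does not finish within the time limit, B raises ValueError; on count_non_overlapping('ab', '', 5): A returns 0, B raises ValueError; on count_non_overlapping('', '', 0): A returns 0, B raises ValueError
import Mathlib
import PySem

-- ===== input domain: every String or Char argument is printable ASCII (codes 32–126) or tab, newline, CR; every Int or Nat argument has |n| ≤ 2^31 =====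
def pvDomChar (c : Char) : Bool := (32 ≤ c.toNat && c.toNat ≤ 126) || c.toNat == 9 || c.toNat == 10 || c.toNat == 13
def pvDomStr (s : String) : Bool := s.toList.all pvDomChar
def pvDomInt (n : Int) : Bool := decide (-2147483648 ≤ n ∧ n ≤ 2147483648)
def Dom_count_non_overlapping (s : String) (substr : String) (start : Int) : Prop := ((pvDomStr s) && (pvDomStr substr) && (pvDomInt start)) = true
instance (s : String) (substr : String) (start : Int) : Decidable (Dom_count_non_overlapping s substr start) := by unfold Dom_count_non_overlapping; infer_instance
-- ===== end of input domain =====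

-- B replaces A's manual index-walking scan (compare a fresh slice at each position,
-- skip by the pattern length on a match) with a split-and-count: non-overlapping
-- occurrences = len(s2.split(substr)) - 1 (objective: simpler; return value only).

-- ===== PORT A =====
-- A's while loop: i walks the sliced string, comparing substr with the slice s2[i:i+a];
-- fuel (length+1) only makes the recursion total — with substr ≠ '' it never runs out.
def pvALoop (sub s2 : List Char) (a : Int) : Nat → Int → Int → Int
  | 0, _, d => d
  | fuel+1, i, d =>
    if i ≤ (s2.length : Int) - 1 then
      let b := i + a
      if sub = PySem.Chars.slice s2 (some i) (some b) then
        pvALoop sub s2 a fuel (i + a) (d + 1)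
      else
        pvALoop sub s2 a fuel (i + 1) d
    else d

def count_non_overlapping (s : String) (substr : String) (start : Int) : Int :=
  let s2 := PySem.Str.slice s (some start) (some (PySem.Str.len s))
  pvALoop substr.toList s2.toList (PySem.Str.len substr) (s2.toList.length + 1) 0 0

-- ===== PORT B =====
-- Source B: return len(s[start:len(s)].split(substr)) - 1.
-- split? returns none exactly when substr = '' (Python raises ValueError there; outside Pre_).
def count_non_overlapping_alt (s : String) (substr : String) (start : Int) : Int :=
  let s2 := PySem.Str.slice s (some start) (some (PySem.Str.len s))
  ((PySem.Str.split? s2 substr).map (fun parts => (parts.length : Int) - 1)).getD 0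

-- ===== PRECONDITION & SPEC =====
-- Pre_ excludes only the empty substr: there A loops forever whenever the sliced
-- string is non-empty (and returns 0 on an empty slice), while B raises ValueError.
def Pre_count_non_overlapping (s : String) (substr : String) (start : Int) : Prop := substr ≠ ""
instance (s : String) (substr : String) (start : Int) : Decidable (Pre_count_non_overlapping s substr start) := by unfold Pre_count_non_overlapping; infer_instance

def pvWitness_count_non_overlapping : String × String × Int := ("abcbcbc", "bc", 1)

def Spec_count_non_overlapping (s : String) (substr : String) (start : Int) (out : Int) : Prop := out = count_non_overlapping_alt s substr start
instance (s : String) (substr : String) (start : Int) (out : Int) : Decidable (Spec_count_non_overlapping s substr start out) := by unfold Spec_count_non_overlapping; infer_instance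

-- ===== CLAIM (what is proved, stated in full; the proofs are below) =====
def Claim_equal_count_non_overlapping : Prop := ∀ (s : String) (substr : String) (start : Int), Dom_count_non_overlapping s substr start → Pre_count_non_overlapping s substr start → Spec_count_non_overlapping s substr start (count_non_overlapping s substr start)

-- ===== LEMMAS AND PROOFS =====

-- A's slice comparison at a natural index i says exactly "sub is a prefix of c.drop i".
lemma pv_matchCond (sub c : List Char) (i : Nat) :
    (sub = PySem.Chars.slice c (some (i : Int)) (some ((i : Int) + (sub.length : Int)))) ↔
      sub <+: c.drop i := by
  rw [PySem.Chars.slice_eq_listSlice, PySem.List.slice_natCast_add,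
    List.prefix_iff_eq_take]

-- the heart: A's scan from position i returns d plus the number of pieces
-- splitOn's scan still produces from c.drop i, minus the pieces already in acc, minus 1
lemma pv_go_main (sub c : List Char) (hs : sub ≠ []) :
    ∀ (n i fa fb : Nat) (cur : List Char) (acc : List (List Char)) (d : Int),
      i ≤ c.length → c.length - i ≤ n → c.length + 1 - i ≤ fa → c.length + 1 - i ≤ fb →
      pvALoop sub c (sub.length : Int) fa (i : Int) d =
        d + ((PySem.Chars.splitOn.go sub fb (c.drop i) cur acc).length : Int)
          - (acc.length : Int) - 1 := by
  intro n
  induction n with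
  | zero =>
    intro i fa fb cur acc d hi hn hfa hfb
    have hie : i = c.length := by omega
    obtain ⟨fa', rfl⟩ : ∃ f, fa = f + 1 := ⟨fa - 1, by omega⟩
    obtain ⟨fb', rfl⟩ : ∃ f, fb = f + 1 := ⟨fb - 1, by omega⟩
    have hd : c.drop i = [] := by simp [hie]
    have hA : ¬ ((i : Int) ≤ (c.length : Int) - 1) := by omega
    simp only [pvALoop, if_neg hA, hd, PySem.Chars.splitOn.go]
    simp; ring
  | succ n ih =>
    intro i fa fb cur acc d hi hn hfa hfb
    obtain ⟨fa', rfl⟩ : ∃ f, fa = f + 1 := ⟨fa - 1, by omega⟩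
    obtain ⟨fb', rfl⟩ : ∃ f, fb = f + 1 := ⟨fb - 1, by omega⟩
    by_cases hie : i = c.length
    · have hd : c.drop i = [] := by simp [hie]
      have hA : ¬ ((i : Int) ≤ (c.length : Int) - 1) := by omega
      simp only [pvALoop, if_neg hA, hd, PySem.Chars.splitOn.go]
      simp; ring
    · -- i < c.length : one character remains
      have hlt : i < c.length := by omega
      obtain ⟨x, hd⟩ : ∃ x, c.drop i = x :: c.drop (i + 1) :=
        ⟨_, List.drop_eq_getElem_cons hlt⟩
      have hA : (i : Int) ≤ (c.length : Int) - 1 := by omega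
      by_cases hm : sub <+: c.drop i
      · -- match: A skips sub.length, go drops sub.length and pushes a piece
        have hms : sub = PySem.Chars.slice c (some (i : Int)) (some ((i : Int) + (sub.length : Int))) :=
          (pv_matchCond sub c i).mpr hm
        have hpl : sub.isPrefixOf (c.drop i) = true := List.isPrefixOf_iff_prefix.mpr hm
        have hlen : sub.length ≤ c.length - i := by
          have := hm.length_le; simp [List.length_drop] at this; omega
        have hpos : 0 < sub.length := List.length_pos_of_ne_nil hs
        have hdd : (c.drop i).drop sub.length = c.drop (i + sub.length) := by
          simp [List.drop_drop]
        have hcast : (i : Int) + (sub.length : Int) = ((i + sub.length : Nat) : Int) := by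
          push_cast; ring
        simp only [pvALoop, if_pos hA]
        rw [if_pos hms, hcast]
        conv_rhs => rw [hd]
        simp only [PySem.Chars.splitOn.go, ← hd, hpl, if_pos, hdd]
        rw [ih (i + sub.length) fa' fb' [] (cur.reverse :: acc) (d + 1)
          (by omega) (by omega) (by omega) (by omega)]
        simp only [List.length_cons]
        push_cast
        ring
      · -- no match: both advance one character
        have hms : ¬ (sub = PySem.Chars.slice c (some (i : Int)) (some ((i : Int) + (sub.length : Int)))) := by
          rw [pv_matchCond]; exact hm
        have hpl : sub.isPrefixOf (c.drop i) = false := by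
          rw [← Bool.not_eq_true, List.isPrefixOf_iff_prefix]; exact hm
        have hcast : (i : Int) + 1 = ((i + 1 : Nat) : Int) := by push_cast; ring
        simp only [pvALoop, if_pos hA, if_neg hms, hcast]
        conv_rhs => rw [hd]
        simp only [PySem.Chars.splitOn.go, ← hd, hpl]
        rw [hd]
        exact ih (i + 1) fa' fb' (x :: cur) acc d (by omega) (by omega) (by omega) (by omega)

-- ===== VERDICT (by name: the statement is the Claim_ definition above) =====
theorem count_non_overlapping_spec : Claim_equal_count_non_overlapping := by
  intro s substr start _ hpre
  unfold Spec_count_non_overlapping count_non_overlapping count_non_overlapping_alt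
  have hsub : substr.toList ≠ [] := by
    intro h
    apply hpre
    have := congrArg String.ofList h
    simpa using this
  have hlen : PySem.Str.len substr = (substr.toList.length : Int) := by
    simp [PySem.Str.len_eq]
  have key : ∀ (s2 : String),
      pvALoop substr.toList s2.toList ((substr.toList.length : Nat) : Int)
        (s2.toList.length + 1) 0 0 =
      ((PySem.Str.split? s2 substr).map (fun parts => (parts.length : Int) - 1)).getD 0 := by
    intro s2
    have hsplit : PySem.Str.split? s2 substr
        = some ((PySem.Chars.splitOn s2.toList substr.toList).map String.ofList) := by
      unfold PySem.Str.split? PySem.Chars.split?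
      simp [List.isEmpty_iff, hsub]
    rw [hsplit]
    simp only [Option.map_some, Option.getD_some, List.length_map]
    have this := pv_go_main substr.toList s2.toList hsub s2.toList.length 0
      (s2.toList.length + 1) (s2.toList.length + 1) [] [] 0
      (by omega) (by omega) (by omega) (by omega)
    simp only [List.drop_zero, List.length_nil, Nat.cast_zero] at this
    rw [this]
    unfold PySem.Chars.splitOn
    omega
  rw [hlen]
  exact key (PySem.Str.slice s (some start) (some (PySem.Str.len s)))
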